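-- pv_equiv track=rewrite | github.com/sykwon/sigmod2025like | src/util.py | pattern_gen2
-- ===== SOURCE A (Python) =====
-- def pattern_gen2(sentences, pat_type="sub", max_len=None, **kwargs):
--     patterns = set()
--     word_tuples = set()
--     for sentence in sentences:
--         words = sentence.split()
--         for i in range(len(words)):
--             for j in range(i + 1, len(words)):
--                 word_tuples.add((words[i], words[j]))
--
--     for words in word_tuples:
--         word1, word2 = words
--         for i in range(len(word1)):
--             for j in range(i + 1, len(word1) + 1):
--                 for k in range(len(word2)):
--                     for l in range(k + 1, len(word2) + 1):
--                         if (j - i) + (l - k) > max_len: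
--                             continue
--                         pattern = "%" + word1[i:j] + "%" + word2[k:l] + "%"
--                         patterns.add(pattern)
--     patterns = list(sorted(patterns))
--     return patterns
-- ===== SOURCE B (Python) =====
-- def pattern_gen2(sentences, pat_type="sub", max_len=None, **kwargs):
--     pairs = set()
--     for sentence in sentences:
--         ws = sentence.split()
--         pairs.update((ws[i], ws[j])
--                      for i in range(len(ws)) for j in range(i + 1, len(ws)))
--     # group the pair set by first word: each distinct first word is handled once
--     partners = {}
--     for w1, w2 in pairs:
--         partners.setdefault(w1, []).append(w2)
--
--     def subs(w):
--         # distinct nonempty substrings, by sliding a window of each length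
--         return {w[i:i + L] for L in range(1, len(w) + 1)
--                 for i in range(len(w) - L + 1)}
--
--     patterns = set()
--     for w1, ws2 in partners.items():
--         right = set()
--         for w2 in ws2:
--             right |= subs(w2)
--         for s1 in subs(w1):
--             for s2 in right:
--                 if len(s1) + len(s2) <= max_len:
--                     patterns.add("%" + s1 + "%" + s2 + "%")
--     return sorted(patterns)
-- ===== Notes on version B (the rewrite author's own statement) =====
-- stated objective: alternative
-- what changed: B groups the word-pair set by first word and, per distinct first word, unions the partner words' substring sets once and crosses it with the first word's substring set (substrings found by sliding windows per length, deduplicated as sets), instead of A's four nested character-index loops re-enumerating index-pair substrings for every word pair; the excluded inputs are exactly those where A raises TypeError (max_len is None with a sentence of two or more words), where B raises the same TypeError.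
import Mathlib
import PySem

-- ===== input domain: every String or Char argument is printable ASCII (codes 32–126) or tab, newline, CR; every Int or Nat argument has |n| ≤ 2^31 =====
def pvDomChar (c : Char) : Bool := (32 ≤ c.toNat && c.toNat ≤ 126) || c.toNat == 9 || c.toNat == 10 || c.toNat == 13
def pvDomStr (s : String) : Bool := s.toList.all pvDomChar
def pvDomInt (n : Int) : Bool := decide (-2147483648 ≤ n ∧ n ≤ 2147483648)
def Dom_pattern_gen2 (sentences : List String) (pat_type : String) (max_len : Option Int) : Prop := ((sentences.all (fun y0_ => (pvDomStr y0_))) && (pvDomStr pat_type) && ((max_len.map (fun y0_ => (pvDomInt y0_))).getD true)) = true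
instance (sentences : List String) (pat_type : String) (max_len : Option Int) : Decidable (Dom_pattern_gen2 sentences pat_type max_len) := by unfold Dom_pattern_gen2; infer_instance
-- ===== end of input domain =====

-- B groups the word-pair set by first word, merges each group's partner substring sets once and
-- crosses them with the first word's substring set (substrings by sliding windows, deduplicated),
-- instead of A's four nested index loops per word pair; objective: alternative decomposition.
-- String concatenation is ported exactly on List Char ('%' :: … ++ …) since Lean's String.append
-- is kernel-opaque.

-- ===== PORT A =====
def pattern_gen2 (sentences : List String) (pat_type : String) (max_len : Option Int) : List String :=
  -- word_tuples = set(); for sentence: words = sentence.split(); nested add of (words[i], words[j])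
  let word_tuples : PySem.Set (String × String) :=
    sentences.foldl (fun wt sentence =>
      let words := PySem.Str.split₀ sentence
      (PySem.List.pyRange 0 (words.length : Int) 1).foldl (fun wt i =>
        (PySem.List.pyRange (i + 1) (words.length : Int) 1).foldl (fun wt j =>
          PySem.Set.add wt (PySem.List.pyGetD words i "", PySem.List.pyGetD words j "")) wt) wt)
      PySem.Set.empty
  -- patterns = set(); four nested index loops per word pair
  let patterns : PySem.Set (List Char) :=
    word_tuples.foldl (fun ps wpair =>
      let word1 := wpair.1.toList
      let word2 := wpair.2.toList
      (PySem.List.pyRange 0 (word1.length : Int) 1).foldl (fun ps i =>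
        (PySem.List.pyRange (i + 1) ((word1.length : Int) + 1) 1).foldl (fun ps j =>
          (PySem.List.pyRange 0 (word2.length : Int) 1).foldl (fun ps k =>
            (PySem.List.pyRange (k + 1) ((word2.length : Int) + 1) 1).foldl (fun ps l =>
              -- 'if (j-i)+(l-k) > max_len: continue' — with max_len None Python raises
              -- TypeError here (excluded by Pre_); the none arm is unreachable under Pre_
              if (match max_len with
                  | some m => decide ((j - i) + (l - k) > m)
                  | none => true) then ps
              else PySem.Set.add ps
                ('%' :: PySem.List.slice word1 (some i) (some j) ++
                 '%' :: PySem.List.slice word2 (some k) (some l) ++ ['%'])) ps) ps) ps) ps)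
      PySem.Set.empty
  PySem.List.sorted (patterns.map String.ofList) (fun x => x) false

-- ===== PORT B =====
-- subs(w) = {w[i:i+L] for L in range(1, len(w)+1) for i in range(len(w)-L+1)}
def pvSubs (w : List Char) : PySem.Set (List Char) :=
  PySem.Set.ofList
    ((PySem.List.pyRange 1 ((w.length : Int) + 1) 1).flatMap (fun L =>
      (PySem.List.pyRange 0 ((w.length : Int) - L + 1) 1).map (fun i =>
        PySem.List.slice w (some i) (some (i + L)))))

def pattern_gen2_alt (sentences : List String) (pat_type : String) (max_len : Option Int) : List String :=
  -- pairs built with set.update over a pair generator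
  let pairs : PySem.Set (String × String) :=
    sentences.foldl (fun wt sentence =>
      let ws := PySem.Str.split₀ sentence
      PySem.Set.update wt
        ((PySem.List.pyRange 0 (ws.length : Int) 1).flatMap (fun i =>
          (PySem.List.pyRange (i + 1) (ws.length : Int) 1).map (fun j =>
            (PySem.List.pyGetD ws i "", PySem.List.pyGetD ws j "")))))
      PySem.Set.empty
  -- partners.setdefault(w1, []).append(w2) = modify w1 [] (· ++ [w2])
  let partners : PySem.Dict String (List String) :=
    pairs.foldl (fun d p => d.modify p.1 [] (· ++ [p.2])) PySem.Dict.empty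
  -- for w1, ws2 in partners.items(): right = union of subs(w2); cross with subs(w1)
  let patterns : PySem.Set (List Char) :=
    partners.items.foldl (fun ps q =>
      let right : PySem.Set (List Char) :=
        q.2.foldl (fun r w2 => PySem.Set.union r (pvSubs w2.toList)) PySem.Set.empty
      (pvSubs q.1.toList).foldl (fun ps s1 =>
        right.foldl (fun ps s2 =>
          -- 'if len(s1)+len(s2) <= max_len' — with max_len None Python raises TypeError
          -- here (excluded by Pre_); the none arm is unreachable under Pre_
          if (match max_len with
              | some m => decide ((s1.length : Int) + (s2.length : Int) ≤ m)
              | none => false) then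
            PySem.Set.add ps ('%' :: s1 ++ '%' :: s2 ++ ['%'])
          else ps) ps) ps)
      PySem.Set.empty
  PySem.List.sorted (patterns.map String.ofList) (fun x => x) false

-- ===== PRECONDITION & SPEC =====
-- Pre_ excludes exactly the inputs where A raises TypeError: max_len is None while some
-- sentence has at least two words (so the int-vs-None comparison is reached).
def Pre_pattern_gen2 (sentences : List String) (pat_type : String) (max_len : Option Int) : Prop :=
  max_len.isSome = true ∨ ∀ s ∈ sentences, (PySem.Str.split₀ s).length ≤ 1
instance (sentences : List String) (pat_type : String) (max_len : Option Int) : Decidable (Pre_pattern_gen2 sentences pat_type max_len) := by unfold Pre_pattern_gen2; infer_instance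

def pvWitness_pattern_gen2 : List String × String × Option Int := (["ab cd", "ab"], "sub", some 3)

def Spec_pattern_gen2 (sentences : List String) (pat_type : String) (max_len : Option Int) (out : List String) : Prop := out = pattern_gen2_alt sentences pat_type max_len
instance (sentences : List String) (pat_type : String) (max_len : Option Int) (out : List String) : Decidable (Spec_pattern_gen2 sentences pat_type max_len out) := by unfold Spec_pattern_gen2; infer_instance

-- ===== CLAIM (what is proved, stated in full; the proofs are below) =====
def Claim_equal_pattern_gen2 : Prop := ∀ (sentences : List String) (pat_type : String) (max_len : Option Int), Dom_pattern_gen2 sentences pat_type max_len → Pre_pattern_gen2 sentences pat_type max_len → Spec_pattern_gen2 sentences pat_type max_len (pattern_gen2 sentences pat_type max_len)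

-- ===== LEMMAS AND PROOFS =====

-- generic membership through a foldl whose step adds elements described by Q
theorem pv_mem_foldl {α β : Type} (l : List β) (g : List α → β → List α) (Q : β → α → Prop)
    (hg : ∀ s b y, y ∈ g s b ↔ y ∈ s ∨ Q b y) (s0 : List α) (y : α) :
    y ∈ l.foldl g s0 ↔ y ∈ s0 ∨ ∃ b ∈ l, Q b y := by
  induction l generalizing s0 with
  | nil => simp
  | cons b l ih =>
    simp only [List.foldl_cons, ih, hg, List.mem_cons]
    constructor
    · rintro ((h | h) | ⟨b', hb', h⟩)
      · exact Or.inl h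
      · exact Or.inr ⟨b, Or.inl rfl, h⟩
      · exact Or.inr ⟨b', Or.inr hb', h⟩
    · rintro (h | ⟨b', (rfl | hb'), h⟩)
      · exact Or.inl (Or.inl h)
      · exact Or.inl (Or.inr h)
      · exact Or.inr ⟨b', hb', h⟩

-- generic Nodup preservation through a foldl
theorem pv_nodup_foldl {α β : Type} (l : List β) (g : List α → β → List α)
    (hg : ∀ s b, s.Nodup → (g s b).Nodup) (s0 : List α) (h0 : s0.Nodup) :
    (l.foldl g s0).Nodup := by
  induction l generalizing s0 with
  | nil => exact h0
  | cons b l ih => exact ih _ (hg _ _ h0)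

theorem pv_mem_ite_add {α : Type} [BEq α] [LawfulBEq α] (s : List α) (c : Bool) (e y : α) :
    (y ∈ if c then s else PySem.Set.add s e) ↔ y ∈ s ∨ (¬ c = true ∧ y = e) := by
  cases c <;> simp [PySem.Set.mem_add]

theorem pv_mem_add_ite {α : Type} [BEq α] [LawfulBEq α] (s : List α) (c : Bool) (e y : α) :
    (y ∈ if c then PySem.Set.add s e else s) ↔ y ∈ s ∨ (c = true ∧ y = e) := by
  cases c <;> simp [PySem.Set.mem_add]

theorem pv_nodup_ite_add {α : Type} [BEq α] [LawfulBEq α] (s : List α) (c : Bool) (e : α)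
    (hs : s.Nodup) : (if c then s else PySem.Set.add s e).Nodup := by
  cases c
  · simpa using PySem.Set.nodup_add _ _ hs
  · simpa using hs

theorem pv_nodup_add_ite {α : Type} [BEq α] [LawfulBEq α] (s : List α) (c : Bool) (e : α)
    (hs : s.Nodup) : (if c then PySem.Set.add s e else s).Nodup := by
  cases c
  · simpa using hs
  · simpa using PySem.Set.nodup_add _ _ hs

theorem pv_clampIdx_eq (n : Nat) (a : Int) (h0 : 0 ≤ a) (h1 : a ≤ n) :
    PySem.List.clampIdx n a = a.toNat := by
  unfold PySem.List.clampIdx; split_ifs <;> omega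

theorem pv_slice_len (w : List Char) (i j : Int) (h0 : 0 ≤ i) (hij : i ≤ j) (hj : j ≤ w.length) :
    ((PySem.List.slice w (some i) (some j)).length : Int) = j - i := by
  rw [PySem.List.length_slice, pv_clampIdx_eq _ _ (le_trans h0 hij) hj,
      pv_clampIdx_eq _ _ h0 (le_trans hij hj)]
  omega

-- B's set.update over the pair generator builds the same list as A's nested add loop
theorem pv_stage1 (sentences : List String) :
    sentences.foldl (fun wt sentence =>
      let ws := PySem.Str.split₀ sentence
      PySem.Set.update wt
        ((PySem.List.pyRange 0 (ws.length : Int) 1).flatMap (fun i =>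
          (PySem.List.pyRange (i + 1) (ws.length : Int) 1).map (fun j =>
            (PySem.List.pyGetD ws i "", PySem.List.pyGetD ws j ""))))) PySem.Set.empty
    = sentences.foldl (fun wt sentence =>
        let words := PySem.Str.split₀ sentence
        (PySem.List.pyRange 0 (words.length : Int) 1).foldl (fun wt i =>
          (PySem.List.pyRange (i + 1) (words.length : Int) 1).foldl (fun wt j =>
            PySem.Set.add wt (PySem.List.pyGetD words i "", PySem.List.pyGetD words j "")) wt) wt)
        PySem.Set.empty := by
  apply PySem.List.foldl_congr_mem
  intro wt s _
  simp only [PySem.Set.update, List.foldl_flatMap, List.foldl_map]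

-- membership in subs(w): exactly the slices w[i:j] with 0 ≤ i < j ≤ len(w)
theorem pv_mem_subs (w : List Char) (s : List Char) :
    s ∈ pvSubs w ↔ ∃ i j : Int, 0 ≤ i ∧ i < (w.length : Int) ∧ i < j ∧ j ≤ (w.length : Int) ∧
      s = PySem.List.slice w (some i) (some j) := by
  simp only [pvSubs, PySem.Set.mem_ofList, List.mem_flatMap, List.mem_map,
    PySem.List.mem_pyRange_one]
  constructor
  · rintro ⟨L, hL, i, hi, rfl⟩
    exact ⟨i, i + L, by omega, by omega, by omega, by omega, rfl⟩
  · rintro ⟨i, j, h0, h1, h2, h3, rfl⟩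
    refine ⟨j - i, by omega, i, by omega, ?_⟩
    rw [show i + (j - i) = j from by omega]

-- the grouped dict: (w1, lst) ∈ items with w2 ∈ lst ↔ (w1, w2) in the pair list
theorem pv_partners_mem (L : List (String × String)) (w1 w2 : String) :
    (∃ lst, (w1, lst) ∈ (L.foldl (fun d p => d.modify p.1 [] (· ++ [p.2]))
        (PySem.Dict.empty : PySem.Dict String (List String))).items ∧ w2 ∈ lst)
      ↔ (w1, w2) ∈ L := by
  have hkn : (L.foldl (fun d p => d.modify p.1 [] (· ++ [p.2]))
      (PySem.Dict.empty : PySem.Dict String (List String))).keys.Nodup :=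
    PySem.Dict.nodup_keys_foldl_modify_key L Prod.fst [] (fun _ p => (· ++ [p.2])) _
      PySem.Dict.nodup_keys_empty
  have hg : (L.foldl (fun d p => d.modify p.1 [] (· ++ [p.2]))
      (PySem.Dict.empty : PySem.Dict String (List String))).getD w1 []
      = (L.filter (fun p => p.1 == w1)).map (·.2) := by
    rw [PySem.Dict.getD_foldl_modify_append]
    simp [PySem.Dict.getD_empty]
  constructor
  · rintro ⟨lst, hm, hw2⟩
    have h1 : (L.foldl (fun d p => d.modify p.1 [] (· ++ [p.2]))
        (PySem.Dict.empty : PySem.Dict String (List String))).getD w1 [] = lst :=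
      PySem.Dict.getD_of_mem_items _ hm hkn []
    rw [hg] at h1
    subst h1
    rcases List.mem_map.mp hw2 with ⟨p, hp, hp2⟩
    rcases List.mem_filter.mp hp with ⟨hpL, hp1⟩
    have : p = (w1, w2) := by
      cases p; simp_all
    rwa [this] at hpL
  · intro hL
    have hk : w1 ∈ (L.foldl (fun d p => d.modify p.1 [] (· ++ [p.2]))
        (PySem.Dict.empty : PySem.Dict String (List String))).keys := by
      rw [PySem.Dict.keys_foldl_modify_key]
      rw [PySem.Dict.keys_empty, PySem.Set.update_nil_left, PySem.Set.mem_ofList]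
      exact List.mem_map.mpr ⟨(w1, w2), hL, rfl⟩
    rcases hget : (L.foldl (fun d p => d.modify p.1 [] (· ++ [p.2]))
        (PySem.Dict.empty : PySem.Dict String (List String))).get? w1 with _ | lst
    · exact absurd ((PySem.Dict.get?_eq_none_iff_not_mem_keys _ _).mp hget) (by simp [hk])
    · refine ⟨lst, PySem.Dict.mem_items_of_get?_eq_some _ hget, ?_⟩
      have h1 := PySem.Dict.getD_of_get?_eq_some _ ([] : List String) hget
      rw [hg] at h1
      rw [← h1]
      exact List.mem_map.mpr ⟨(w1, w2), List.mem_filter.mpr ⟨hL, by simp⟩, rfl⟩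

-- membership characterization of A's pattern set over a pair list L
theorem pv_memA (L : List (String × String)) (max_len : Option Int) (x : List Char) :
    x ∈ L.foldl (fun ps wpair =>
      let word1 := wpair.1.toList
      let word2 := wpair.2.toList
      (PySem.List.pyRange 0 (word1.length : Int) 1).foldl (fun ps i =>
        (PySem.List.pyRange (i + 1) ((word1.length : Int) + 1) 1).foldl (fun ps j =>
          (PySem.List.pyRange 0 (word2.length : Int) 1).foldl (fun ps k =>
            (PySem.List.pyRange (k + 1) ((word2.length : Int) + 1) 1).foldl (fun ps l =>
              if (match max_len with
                  | some m => decide ((j - i) + (l - k) > m)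
                  | none => true) then ps
              else PySem.Set.add ps
                ('%' :: PySem.List.slice word1 (some i) (some j) ++
                 '%' :: PySem.List.slice word2 (some k) (some l) ++ ['%'])) ps) ps) ps) ps)
      PySem.Set.empty
    ↔ ∃ p ∈ L, ∃ i ∈ PySem.List.pyRange 0 (p.1.toList.length : Int) 1,
        ∃ j ∈ PySem.List.pyRange (i + 1) ((p.1.toList.length : Int) + 1) 1,
        ∃ k ∈ PySem.List.pyRange 0 (p.2.toList.length : Int) 1,
        ∃ l ∈ PySem.List.pyRange (k + 1) ((p.2.toList.length : Int) + 1) 1,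
        ¬ ((match max_len with
            | some m => decide ((j - i) + (l - k) > m)
            | none => true) = true) ∧
        x = '%' :: PySem.List.slice p.1.toList (some i) (some j) ++
            '%' :: PySem.List.slice p.2.toList (some k) (some l) ++ ['%'] :=
  Iff.trans
    (pv_mem_foldl L _
      (fun p x => ∃ i ∈ PySem.List.pyRange 0 (p.1.toList.length : Int) 1,
        ∃ j ∈ PySem.List.pyRange (i + 1) ((p.1.toList.length : Int) + 1) 1,
        ∃ k ∈ PySem.List.pyRange 0 (p.2.toList.length : Int) 1,
        ∃ l ∈ PySem.List.pyRange (k + 1) ((p.2.toList.length : Int) + 1) 1,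
        ¬ ((match max_len with
            | some m => decide ((j - i) + (l - k) > m)
            | none => true) = true) ∧
        x = '%' :: PySem.List.slice p.1.toList (some i) (some j) ++
            '%' :: PySem.List.slice p.2.toList (some k) (some l) ++ ['%'])
      (fun s p y =>
        pv_mem_foldl _ _
          (fun i y => ∃ j ∈ PySem.List.pyRange (i + 1) ((p.1.toList.length : Int) + 1) 1,
            ∃ k ∈ PySem.List.pyRange 0 (p.2.toList.length : Int) 1,
            ∃ l ∈ PySem.List.pyRange (k + 1) ((p.2.toList.length : Int) + 1) 1,
            ¬ ((match max_len with
                | some m => decide ((j - i) + (l - k) > m)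
                | none => true) = true) ∧
            y = '%' :: PySem.List.slice p.1.toList (some i) (some j) ++
                '%' :: PySem.List.slice p.2.toList (some k) (some l) ++ ['%'])
          (fun s i y =>
            pv_mem_foldl _ _
              (fun j y => ∃ k ∈ PySem.List.pyRange 0 (p.2.toList.length : Int) 1,
                ∃ l ∈ PySem.List.pyRange (k + 1) ((p.2.toList.length : Int) + 1) 1,
                ¬ ((match max_len with
                    | some m => decide ((j - i) + (l - k) > m)
                    | none => true) = true) ∧
                y = '%' :: PySem.List.slice p.1.toList (some i) (some j) ++
                    '%' :: PySem.List.slice p.2.toList (some k) (some l) ++ ['%'])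
              (fun s j y =>
                pv_mem_foldl _ _
                  (fun k y => ∃ l ∈ PySem.List.pyRange (k + 1) ((p.2.toList.length : Int) + 1) 1,
                    ¬ ((match max_len with
                        | some m => decide ((j - i) + (l - k) > m)
                        | none => true) = true) ∧
                    y = '%' :: PySem.List.slice p.1.toList (some i) (some j) ++
                        '%' :: PySem.List.slice p.2.toList (some k) (some l) ++ ['%'])
                  (fun s k y =>
                    pv_mem_foldl _ _
                      (fun l y =>
                        ¬ ((match max_len with
                            | some m => decide ((j - i) + (l - k) > m)
                            | none => true) = true) ∧
                        y = '%' :: PySem.List.slice p.1.toList (some i) (some j) ++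
                            '%' :: PySem.List.slice p.2.toList (some k) (some l) ++ ['%'])
                      (fun s l y => pv_mem_ite_add s _ _ y) s y) s y) s y) s y)
      PySem.Set.empty x)
    (by simp [PySem.Set.empty])

-- membership in B's merged right set
theorem pv_mem_right (lst : List String) (y : List Char) :
    y ∈ lst.foldl (fun r w2 => PySem.Set.union r (pvSubs w2.toList)) PySem.Set.empty
      ↔ ∃ w2 ∈ lst, y ∈ pvSubs w2.toList := by
  refine Iff.trans (pv_mem_foldl _ _ (fun w2 y => y ∈ pvSubs w2.toList) ?_ _ _)
    (by simp [PySem.Set.empty])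
  intro s b y
  exact PySem.Set.mem_union s _ y

-- membership characterization of B's pattern set over the grouped dict of a pair list L
theorem pv_memB (L : List (String × String)) (max_len : Option Int) (x : List Char) :
    x ∈ (L.foldl (fun d p => d.modify p.1 [] (· ++ [p.2]))
        (PySem.Dict.empty : PySem.Dict String (List String))).items.foldl (fun ps q =>
      let right : PySem.Set (List Char) :=
        q.2.foldl (fun r w2 => PySem.Set.union r (pvSubs w2.toList)) PySem.Set.empty
      (pvSubs q.1.toList).foldl (fun ps s1 =>
        right.foldl (fun ps s2 =>
          if (match max_len with
              | some m => decide ((s1.length : Int) + (s2.length : Int) ≤ m)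
              | none => false) then
            PySem.Set.add ps ('%' :: s1 ++ '%' :: s2 ++ ['%'])
          else ps) ps) ps)
      PySem.Set.empty
    ↔ ∃ q ∈ (L.foldl (fun d p => d.modify p.1 [] (· ++ [p.2]))
          (PySem.Dict.empty : PySem.Dict String (List String))).items,
        ∃ s1 ∈ pvSubs q.1.toList,
        ∃ s2 ∈ q.2.foldl (fun r w2 => PySem.Set.union r (pvSubs w2.toList)) PySem.Set.empty,
        ((match max_len with
          | some m => decide ((s1.length : Int) + (s2.length : Int) ≤ m)
          | none => false) = true) ∧
        x = '%' :: s1 ++ '%' :: s2 ++ ['%'] :=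
  Iff.trans
    (pv_mem_foldl _ _
      (fun q x => ∃ s1 ∈ pvSubs q.1.toList,
        ∃ s2 ∈ q.2.foldl (fun r w2 => PySem.Set.union r (pvSubs w2.toList)) PySem.Set.empty,
        ((match max_len with
          | some m => decide ((s1.length : Int) + (s2.length : Int) ≤ m)
          | none => false) = true) ∧
        x = '%' :: s1 ++ '%' :: s2 ++ ['%'])
      (fun s q y =>
        pv_mem_foldl _ _
          (fun s1 y =>
            ∃ s2 ∈ q.2.foldl (fun r w2 => PySem.Set.union r (pvSubs w2.toList)) PySem.Set.empty,
            ((match max_len with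
              | some m => decide ((s1.length : Int) + (s2.length : Int) ≤ m)
              | none => false) = true) ∧
            y = '%' :: s1 ++ '%' :: s2 ++ ['%'])
          (fun s s1 y =>
            pv_mem_foldl _ _
              (fun s2 y =>
                ((match max_len with
                  | some m => decide ((s1.length : Int) + (s2.length : Int) ≤ m)
                  | none => false) = true) ∧
                y = '%' :: s1 ++ '%' :: s2 ++ ['%'])
              (fun s s2 y => pv_mem_add_ite s _ _ y) s y) s y)
      PySem.Set.empty x)
    (by simp [PySem.Set.empty])

-- A's pattern set is duplicate-free
theorem pv_nodupA (L : List (String × String)) (max_len : Option Int) :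
    (L.foldl (fun ps wpair =>
      let word1 := wpair.1.toList
      let word2 := wpair.2.toList
      (PySem.List.pyRange 0 (word1.length : Int) 1).foldl (fun ps i =>
        (PySem.List.pyRange (i + 1) ((word1.length : Int) + 1) 1).foldl (fun ps j =>
          (PySem.List.pyRange 0 (word2.length : Int) 1).foldl (fun ps k =>
            (PySem.List.pyRange (k + 1) ((word2.length : Int) + 1) 1).foldl (fun ps l =>
              if ((match max_len with
                  | some m => decide ((j - i) + (l - k) > m)
                  | none => true) : Bool) then ps
              else PySem.Set.add ps
                ('%' :: PySem.List.slice word1 (some i) (some j) ++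
                 '%' :: PySem.List.slice word2 (some k) (some l) ++ ['%'])) ps) ps) ps) ps)
      PySem.Set.empty).Nodup := by
  refine pv_nodup_foldl _ _ ?_ _ List.nodup_nil
  intro s p hs
  dsimp only
  refine pv_nodup_foldl _ _ ?_ _ hs
  intro s i hs
  dsimp only
  refine pv_nodup_foldl _ _ ?_ _ hs
  intro s j hs
  dsimp only
  refine pv_nodup_foldl _ _ ?_ _ hs
  intro s k hs
  dsimp only
  refine pv_nodup_foldl _ _ ?_ _ hs
  intro s l hs
  exact pv_nodup_ite_add s _ _ hs

-- B's pattern set is duplicate-free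
theorem pv_nodupB (L : List (String × String)) (max_len : Option Int) :
    ((L.foldl (fun d p => d.modify p.1 [] (· ++ [p.2]))
        (PySem.Dict.empty : PySem.Dict String (List String))).items.foldl (fun ps q =>
      let right : PySem.Set (List Char) :=
        q.2.foldl (fun r w2 => PySem.Set.union r (pvSubs w2.toList)) PySem.Set.empty
      (pvSubs q.1.toList).foldl (fun ps s1 =>
        right.foldl (fun ps s2 =>
          if ((match max_len with
              | some m => decide ((s1.length : Int) + (s2.length : Int) ≤ m)
              | none => false) : Bool) then
            PySem.Set.add ps ('%' :: s1 ++ '%' :: s2 ++ ['%'])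
          else ps) ps) ps)
      PySem.Set.empty).Nodup := by
  refine pv_nodup_foldl _ _ ?_ _ List.nodup_nil
  intro s q hs
  dsimp only
  refine pv_nodup_foldl _ _ ?_ _ hs
  intro s s1 hs
  dsimp only
  refine pv_nodup_foldl _ _ ?_ _ hs
  intro s s2 hs
  exact pv_nodup_add_ite s _ _ hs

-- the two characterizations agree
theorem pv_AB (L : List (String × String)) (max_len : Option Int) (x : List Char) :
    (∃ p ∈ L, ∃ i ∈ PySem.List.pyRange 0 (p.1.toList.length : Int) 1,
        ∃ j ∈ PySem.List.pyRange (i + 1) ((p.1.toList.length : Int) + 1) 1,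
        ∃ k ∈ PySem.List.pyRange 0 (p.2.toList.length : Int) 1,
        ∃ l ∈ PySem.List.pyRange (k + 1) ((p.2.toList.length : Int) + 1) 1,
        ¬ ((match max_len with
            | some m => decide ((j - i) + (l - k) > m)
            | none => true) = true) ∧
        x = '%' :: PySem.List.slice p.1.toList (some i) (some j) ++
            '%' :: PySem.List.slice p.2.toList (some k) (some l) ++ ['%'])
    ↔ (∃ q ∈ (L.foldl (fun d p => d.modify p.1 [] (· ++ [p.2]))
          (PySem.Dict.empty : PySem.Dict String (List String))).items,
        ∃ s1 ∈ pvSubs q.1.toList,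
        ∃ s2 ∈ q.2.foldl (fun r w2 => PySem.Set.union r (pvSubs w2.toList)) PySem.Set.empty,
        ((match max_len with
          | some m => decide ((s1.length : Int) + (s2.length : Int) ≤ m)
          | none => false) = true) ∧
        x = '%' :: s1 ++ '%' :: s2 ++ ['%']) := by
  constructor
  · rintro ⟨⟨w1, w2⟩, hpL, i, hi, j, hj, k, hk, l, hl, hc, rfl⟩
    rw [PySem.List.mem_pyRange_one] at hi hj hk hl
    dsimp only at hi hj hk hl
    obtain ⟨lst, hq, hw2⟩ := (pv_partners_mem L w1 w2).mpr hpL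
    rcases max_len with _ | m
    · exact absurd rfl hc
    refine ⟨(w1, lst), hq, PySem.List.slice w1.toList (some i) (some j), ?_,
      PySem.List.slice w2.toList (some k) (some l), ?_, ?_, rfl⟩
    · exact (pv_mem_subs w1.toList _).mpr ⟨i, j, by omega, by omega, by omega, by omega, rfl⟩
    · exact (pv_mem_right lst _).mpr
        ⟨w2, hw2, (pv_mem_subs w2.toList _).mpr ⟨k, l, by omega, by omega, by omega, by omega, rfl⟩⟩
    · rw [pv_slice_len _ i j (by omega) (by omega) (by omega),
          pv_slice_len _ k l (by omega) (by omega) (by omega)]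
      simp only [decide_eq_true_eq] at hc ⊢
      omega
  · rintro ⟨⟨w1, lst⟩, hq, s1, hs1, s2, hs2, hc, rfl⟩
    obtain ⟨w2, hw2, hs2'⟩ := (pv_mem_right lst s2).mp hs2
    have hpL : (w1, w2) ∈ L := (pv_partners_mem L w1 w2).mp ⟨lst, hq, hw2⟩
    obtain ⟨i, j, hi0, hi1, hij, hjl, rfl⟩ := (pv_mem_subs _ _).mp hs1
    obtain ⟨k, l, hk0, hk1, hkl, hll, rfl⟩ := (pv_mem_subs _ _).mp hs2'
    dsimp only at hi0 hi1 hij hjl hk0 hk1 hkl hll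
    rcases max_len with _ | m
    · exact absurd hc (by simp)
    refine ⟨(w1, w2), hpL, i, ?_, j, ?_, k, ?_, l, ?_, ?_, rfl⟩
    · show i ∈ PySem.List.pyRange 0 (w1.toList.length : Int) 1
      rw [PySem.List.mem_pyRange_one]; omega
    · show j ∈ PySem.List.pyRange (i + 1) ((w1.toList.length : Int) + 1) 1
      rw [PySem.List.mem_pyRange_one]; omega
    · show k ∈ PySem.List.pyRange 0 (w2.toList.length : Int) 1
      rw [PySem.List.mem_pyRange_one]; omega
    · show l ∈ PySem.List.pyRange (k + 1) ((w2.toList.length : Int) + 1) 1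
      rw [PySem.List.mem_pyRange_one]; omega
    · rw [pv_slice_len _ i j (by omega) (by omega) (by omega),
          pv_slice_len _ k l (by omega) (by omega) (by omega)] at hc
      simp only [decide_eq_true_eq] at hc ⊢
      omega

-- the main extensional equality, over the shared pair list
theorem pattern_gen2_eq_alt (sentences : List String) (pat_type : String) (max_len : Option Int) :
    pattern_gen2 sentences pat_type max_len = pattern_gen2_alt sentences pat_type max_len := by
  simp only [pattern_gen2, pattern_gen2_alt]
  rw [← pv_stage1]
  apply PySem.List.sorted_eq_sorted_of_perm _ _ _ (fun a b h => h)
  apply List.Perm.map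
  apply (List.perm_ext_iff_of_nodup (pv_nodupA _ max_len) (pv_nodupB _ max_len)).mpr
  intro x
  exact ((pv_memA _ max_len x).trans (pv_AB _ max_len x)).trans (pv_memB _ max_len x).symm

-- ===== VERDICT (by name: the statement is the Claim_ definition above) =====
theorem pattern_gen2_spec : Claim_equal_pattern_gen2 := by
  intro sentences pat_type max_len _ _
  unfold Spec_pattern_gen2
  exact pattern_gen2_eq_alt sentences pat_type max_len
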